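-- pv_equiv track=rewrite | github.com/LukachoLombardi/tfTesting | PawnChessTrainer.py | get_row_number
-- ===== SOURCE A (Python) =====
-- def get_row_number(field_1):
--     board = [0] * 72
--     board[field_1] = 1
--     list_chunks = []
--     for i in range(7, 64, 8):
--         list_chunks.append(board[i - 7:i + 1])
--     for chunk in list_chunks:
--         if 1 in chunk:
--             return list_chunks.index(chunk)
-- ===== SOURCE B (Python) =====
-- def get_row_number(field_1):
--     board = [0] * 72
--     board[field_1] = 1
--     pos = board.index(1)
--     return pos // 8 if pos < 64 else None
-- ===== Notes on version B (the rewrite author's own statement) =====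
-- stated objective: simpler
-- what changed: Instead of building eight row chunks and scanning each for the mark, B finds the mark's position once with a single list index lookup and converts it to a row number by floor division (None when the position lies past the chunked region).
import Mathlib
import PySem

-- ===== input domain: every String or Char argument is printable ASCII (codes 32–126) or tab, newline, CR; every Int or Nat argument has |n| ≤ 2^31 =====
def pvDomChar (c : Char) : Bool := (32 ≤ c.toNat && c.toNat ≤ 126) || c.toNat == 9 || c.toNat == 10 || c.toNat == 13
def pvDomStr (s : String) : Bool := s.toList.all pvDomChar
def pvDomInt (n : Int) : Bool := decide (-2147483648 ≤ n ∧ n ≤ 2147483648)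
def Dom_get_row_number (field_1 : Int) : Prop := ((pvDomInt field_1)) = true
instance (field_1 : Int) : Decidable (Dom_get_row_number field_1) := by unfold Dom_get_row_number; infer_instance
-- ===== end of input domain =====

-- B locates the marked position with a single list-index lookup plus floor division
-- instead of building eight row chunks and scanning each (objective: simpler).


-- ===== PORT A =====
-- helper: the final 'for chunk in list_chunks: if 1 in chunk: return list_chunks.index(chunk)'
def pvFindChunkA (chunks all : List (List Int)) : Option Int :=
  match chunks with
  | [] => none
  | c :: rest =>
      if (1 : Int) ∈ c then (PySem.List.index? all c).map (fun n => (n : Int))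
      else pvFindChunkA rest all

def get_row_number (field_1 : Int) : Option Int :=
  let board := PySem.List.pySetD (List.replicate 72 (0 : Int)) field_1 1
  let list_chunks :=
    (PySem.List.pyRange 7 64 8).foldl
      (fun acc i => acc ++ [PySem.List.slice board (some (i - 7)) (some (i + 1))]) []
  pvFindChunkA list_chunks list_chunks

-- ===== PORT B =====
def get_row_number_alt (field_1 : Int) : Option Int :=
  let board := PySem.List.pySetD (List.replicate 72 (0 : Int)) field_1 1
  match PySem.List.index? board (1 : Int) with
  | none => none
  | some pos => if (pos : Int) < 64 then some (PySem.Int.floordiv pos 8) else none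

-- ===== PRECONDITION & SPEC =====
-- Pre_ excludes exactly the inputs where the board assignment to a mark raises an IndexError in Python (index out of range).
def Pre_get_row_number (field_1 : Int) : Prop := -72 ≤ field_1 ∧ field_1 < 72
instance (field_1 : Int) : Decidable (Pre_get_row_number field_1) := by unfold Pre_get_row_number; infer_instance
def pvWitness_get_row_number : Int := 19

def Spec_get_row_number (field_1 : Int) (out : Option Int) : Prop := out = get_row_number_alt field_1
instance (field_1 : Int) (out : Option Int) : Decidable (Spec_get_row_number field_1 out) := by unfold Spec_get_row_number; infer_instance

-- ===== CLAIM (what is proved, stated in full; the proofs are below) =====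
def Claim_equal_get_row_number : Prop := ∀ (field_1 : Int), Dom_get_row_number field_1 → Pre_get_row_number field_1 → Spec_get_row_number field_1 (get_row_number field_1)

-- ===== LEMMAS AND PROOFS =====

-- ===== VERDICT (by name: the statement is the Claim_ definition above) =====
theorem get_row_number_spec : Claim_equal_get_row_number := by
  intro f _ hp
  unfold Spec_get_row_number
  obtain ⟨h1, h2⟩ := hp
  interval_cases f <;> decide
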